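-- pv_equiv track=rewrite | github.com/olsenw/LeetCodeExercises | Python3/maximum_profit_from_trading_stocks_with_discounts.py | maxProfit_incomplete
-- ===== SOURCE A (Python) =====
-- from typing import List, Dict, Set, Optional
--
-- def maxProfit_incomplete(n: int, present: List[int], future: List[int], hierarchy: List[List[int]], budget: int) -> int:
--     graph = {i:[] for i in range(1, n+1)}
--     for i,j in hierarchy:
--         graph[i].append(j)
--     maxProfit = [0] * n
--     maxProfitDiscount = [0] * n
--     def dfs(i:int) -> int:
--         profit = future[i-1] - present[i-1]
--         discount = future[i-1] - (present[i-1] // 2)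
--         bestBuy = 0
--         bestPass = 0
--         for j in graph[i]:
--             dfs(j)
--             bestBuy += maxProfitDiscount[j-1]
--             bestPass += maxProfit[j-1]
--         maxProfit[i-1] = max(bestPass, profit + bestBuy)
--         maxProfitDiscount[i-1] = max(bestPass, discount + bestBuy)
--     dfs(1)
--     return maxProfit
-- ===== SOURCE B (Python) =====
-- def maxProfit_incomplete(n, present, future, hierarchy, budget):
--     children = {i: [] for i in range(1, n + 1)}
--     for i, j in hierarchy:
--         children[i].append(j)
--     # iterative post-order of the part reachable from node 1 (explicit stack)
--     order = []
--     stack = [(1, False)]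
--     while stack:
--         node, done = stack.pop()
--         if done:
--             order.append(node)
--         else:
--             stack.append((node, True))
--             for j in reversed(children[node]):
--                 stack.append((j, False))
--     maxProfit = [0] * n
--     maxProfitDiscount = [0] * n
--     for i in order:
--         bestBuy = sum(maxProfitDiscount[j - 1] for j in children[i])
--         bestPass = sum(maxProfit[j - 1] for j in children[i])
--         maxProfit[i - 1] = max(bestPass, future[i - 1] - present[i - 1] + bestBuy)
--         maxProfitDiscount[i - 1] = max(bestPass, future[i - 1] - present[i - 1] // 2 + bestBuy)
--     return maxProfit
-- ===== Notes on version B (the rewrite author's own statement) =====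
-- stated objective: alternative
-- what changed: A computes the tree DP by a recursive dfs that mutates the two arrays from inside nested calls; B first derives a post-order of the nodes reachable from node 1 with an explicit two-phase stack and then fills the same arrays in one non-recursive pass over that order.
import Mathlib
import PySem

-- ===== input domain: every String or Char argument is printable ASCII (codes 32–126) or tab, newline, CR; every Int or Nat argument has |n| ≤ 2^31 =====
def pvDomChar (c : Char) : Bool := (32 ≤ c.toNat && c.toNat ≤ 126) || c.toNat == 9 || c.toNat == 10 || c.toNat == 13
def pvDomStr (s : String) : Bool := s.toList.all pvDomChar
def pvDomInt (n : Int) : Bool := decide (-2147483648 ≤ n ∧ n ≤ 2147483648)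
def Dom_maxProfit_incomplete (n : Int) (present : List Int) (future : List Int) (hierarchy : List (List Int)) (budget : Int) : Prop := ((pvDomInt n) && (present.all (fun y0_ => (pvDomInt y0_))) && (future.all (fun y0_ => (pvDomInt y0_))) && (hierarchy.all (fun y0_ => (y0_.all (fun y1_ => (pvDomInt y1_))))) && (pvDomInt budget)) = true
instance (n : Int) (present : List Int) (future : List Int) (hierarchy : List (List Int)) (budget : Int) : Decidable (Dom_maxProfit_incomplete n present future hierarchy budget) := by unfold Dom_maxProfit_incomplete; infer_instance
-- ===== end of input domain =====

-- B replaces A's recursive dfs with an explicit two-phase stack that yields a post-order of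
-- the nodes reachable from node 1, followed by one pass over that order (objective: alternative).

-- ===== PORT A =====
-- graph = {i:[] for i in range(1, n+1)}; for i,j in hierarchy: graph[i].append(j)
-- (shared by both ports: both Pythons build the same child-adjacency dict this way)
def pvBuildGraph (n : Int) (hierarchy : List (List Int)) : PySem.Dict Int (List Int) :=
  hierarchy.foldl
    (fun d e =>
      match e with
      | [i, j] => d.modify i [] (fun l => l ++ [j])
      | _ => d)
    ((PySem.List.pyRange 1 (n + 1) 1).foldl (fun d i => d.insert i ([] : List Int)) PySem.Dict.empty)

-- A's dfs, on the state (maxProfit, maxProfitDiscount); the Nat is a fuel guard making the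
-- untyped recursion total — under Pre_ (edges strictly increase) depth n+1 is sufficient.
def pvDfsA (g : PySem.Dict Int (List Int)) (present future : List Int) :
    Nat → Int → List Int × List Int → List Int × List Int
  | 0, _, st => st
  | fuel+1, i, st =>
    let profit := PySem.List.pyGetD future (i-1) 0 - PySem.List.pyGetD present (i-1) 0
    let discount := PySem.List.pyGetD future (i-1) 0 -
      PySem.Int.floordiv (PySem.List.pyGetD present (i-1) 0) 2
    let r := (g.getD i []).foldl
      (fun (acc : (List Int × List Int) × Int × Int) j =>
        let st' := pvDfsA g present future fuel j acc.1
        (st', acc.2.1 + PySem.List.pyGetD st'.2 (j-1) 0, acc.2.2 + PySem.List.pyGetD st'.1 (j-1) 0))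
      (st, (0 : Int), (0 : Int))
    (PySem.List.pySetD r.1.1 (i-1) (max r.2.2 (profit + r.2.1)),
     PySem.List.pySetD r.1.2 (i-1) (max r.2.2 (discount + r.2.1)))

def maxProfit_incomplete (n : Int) (present : List Int) (future : List Int) (hierarchy : List (List Int)) (budget : Int) : List Int :=
  let g := pvBuildGraph n hierarchy
  let mp0 : List Int := List.replicate n.toNat 0
  (pvDfsA g present future (n.toNat + 1) 1 (mp0, mp0)).1

-- ===== PORT B =====
-- Fuel bound for B's while loop (a totality guard only): the exact number of stack pops
-- needed for the tree unfolded from node i, computed to depth fuel.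
def pvCostB (g : PySem.Dict Int (List Int)) : Nat → Int → Nat
  | 0, _ => 1
  | fuel+1, i => (g.getD i []).foldl (fun a j => a + pvCostB g fuel j) 2

-- the while loop: pop (node, done); done → emit node; else push (node, True) then reversed children
def pvStackB (g : PySem.Dict Int (List Int)) : Nat → List (Int × Bool) → List Int → List Int
  | 0, _, order => order
  | _+1, [], order => order
  | fuel+1, (node, done) :: rest, order =>
    if done then pvStackB g fuel rest (order ++ [node])
    else pvStackB g fuel
      ((g.getD node []).reverse.foldl (fun s j => (j, false) :: s) ((node, true) :: rest)) order

-- the body of B's final 'for i in order' pass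
def pvStepB (g : PySem.Dict Int (List Int)) (present future : List Int)
    (st : List Int × List Int) (i : Int) : List Int × List Int :=
  let bestBuy := (g.getD i []).foldl (fun a j => a + PySem.List.pyGetD st.2 (j-1) 0) (0 : Int)
  let bestPass := (g.getD i []).foldl (fun a j => a + PySem.List.pyGetD st.1 (j-1) 0) (0 : Int)
  (PySem.List.pySetD st.1 (i-1)
     (max bestPass (PySem.List.pyGetD future (i-1) 0 - PySem.List.pyGetD present (i-1) 0 + bestBuy)),
   PySem.List.pySetD st.2 (i-1)
     (max bestPass (PySem.List.pyGetD future (i-1) 0 -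
        PySem.Int.floordiv (PySem.List.pyGetD present (i-1) 0) 2 + bestBuy)))

def maxProfit_incomplete_alt (n : Int) (present : List Int) (future : List Int) (hierarchy : List (List Int)) (budget : Int) : List Int :=
  let g := pvBuildGraph n hierarchy
  let order := pvStackB g (pvCostB g (n.toNat + 1) 1) [(1, false)] []
  let mp0 : List Int := List.replicate n.toNat 0
  (order.foldl (pvStepB g present future) (mp0, mp0)).1

-- the children of node i as written in the hierarchy list itself (used by Pre_, so that the
-- precondition is a condition on the raw input; the bridge to the ports' dict is pvChildren_eq)
def pvChildren (hierarchy : List (List Int)) (i : Int) : List Int :=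
  (hierarchy.filter (fun e => e.getD 0 0 == i)).map (fun e => e.getD 1 0)

-- nodes reachable from node 1 in at most `fuel` steps (saturation; a PySem.Set)
def pvReach (ch : Int → List Int) : Nat → List Int
  | 0 => [1]
  | fuel+1 => (pvReach ch fuel).foldl
      (fun acc i => PySem.Set.update acc (ch i)) (pvReach ch fuel)

-- height of the DAG unfolded below a node, cut off at depth `fuel` (a shape property of the
-- input hierarchy only; neither port computes ranks or reach sets)
def pvRank (ch : Int → List Int) : Nat → Int → Nat
  | 0, _ => 0
  | fuel+1, i => (ch i).foldl (fun a j => max a (pvRank ch fuel j + 1)) 0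

-- ===== PRECONDITION & SPEC =====
-- Pre_ is exactly the set of inputs on which A returns normally, stated on the input graph:
-- n ≥ 1, every hierarchy entry is a pair whose source is a valid node 1..n, and — with R the
-- nodes reachable from node 1 (fuel |hierarchy| saturates, since a shortest path uses each
-- edge at most once) — every reachable node is a valid index into present/future and into the
-- length-n output, the reachable subgraph is acyclic (the height pvRank strictly drops along
-- its edges), and its height is at most n (automatic for an acyclic subgraph of 1..n).
-- Outside Pre_ the Python A raises (KeyError/IndexError/ValueError) or recurses forever.
def Pre_maxProfit_incomplete (n : Int) (present : List Int) (future : List Int) (hierarchy : List (List Int)) (budget : Int) : Prop :=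
  1 ≤ n ∧
  (∀ e ∈ hierarchy, e.length = 2 ∧ 1 ≤ e.getD 0 0 ∧ e.getD 0 0 ≤ n) ∧
  (∀ r ∈ pvReach (pvChildren hierarchy) hierarchy.length,
     1 ≤ r ∧ r ≤ n ∧ r ≤ (present.length : Int) ∧ r ≤ (future.length : Int)) ∧
  (∀ r ∈ pvReach (pvChildren hierarchy) hierarchy.length,
     ∀ j ∈ pvChildren hierarchy r,
       j ∈ pvReach (pvChildren hierarchy) hierarchy.length ∧
       pvRank (pvChildren hierarchy) hierarchy.length j <
         pvRank (pvChildren hierarchy) hierarchy.length r) ∧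
  (∀ r ∈ pvReach (pvChildren hierarchy) hierarchy.length,
     pvRank (pvChildren hierarchy) hierarchy.length r ≤ n.toNat)

instance (n : Int) (present : List Int) (future : List Int) (hierarchy : List (List Int)) (budget : Int) : Decidable (Pre_maxProfit_incomplete n present future hierarchy budget) := by
  unfold Pre_maxProfit_incomplete; infer_instance

def pvWitness_maxProfit_incomplete : Int × List Int × List Int × List (List Int) × Int :=
  (3, [4, 2, 6], [7, 9, 5], [[1, 2], [1, 3]], 0)

def Spec_maxProfit_incomplete (n : Int) (present : List Int) (future : List Int) (hierarchy : List (List Int)) (budget : Int) (out : List Int) : Prop := out = maxProfit_incomplete_alt n present future hierarchy budget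
instance (n : Int) (present : List Int) (future : List Int) (hierarchy : List (List Int)) (budget : Int) (out : List Int) : Decidable (Spec_maxProfit_incomplete n present future hierarchy budget out) := by unfold Spec_maxProfit_incomplete; infer_instance

-- ===== CLAIM (what is proved, stated in full; the proofs are below) =====
def Claim_equal_maxProfit_incomplete : Prop := ∀ (n : Int) (present : List Int) (future : List Int) (hierarchy : List (List Int)) (budget : Int), Dom_maxProfit_incomplete n present future hierarchy budget → Pre_maxProfit_incomplete n present future hierarchy budget → Spec_maxProfit_incomplete n present future hierarchy budget (maxProfit_incomplete n present future hierarchy budget)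

-- ===== LEMMAS AND PROOFS =====

-- the pure DP value (maxProfit, maxProfitDiscount) of a node, to recursion depth fuel
def pvVal (g : PySem.Dict Int (List Int)) (present future : List Int) : Nat → Int → Int × Int
  | 0, _ => (0, 0)
  | fuel+1, i =>
    (max ((g.getD i []).foldl (fun a j => a + (pvVal g present future fuel j).1) (0 : Int))
       (PySem.List.pyGetD future (i-1) 0 - PySem.List.pyGetD present (i-1) 0 +
         (g.getD i []).foldl (fun a j => a + (pvVal g present future fuel j).2) (0 : Int)),
     max ((g.getD i []).foldl (fun a j => a + (pvVal g present future fuel j).1) (0 : Int))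
       (PySem.List.pyGetD future (i-1) 0 -
          PySem.Int.floordiv (PySem.List.pyGetD present (i-1) 0) 2 +
         (g.getD i []).foldl (fun a j => a + (pvVal g present future fuel j).2) (0 : Int)))

-- the post-order node sequence of the tree unfolded from i, to depth fuel
def pvPo (g : PySem.Dict Int (List Int)) : Nat → Int → List Int
  | 0, _ => []
  | fuel+1, i => ((g.getD i []).flatMap (pvPo g fuel)) ++ [i]

-- what Pre_ gives about the graph: reachable nodes lie in [1, n], reachability is closed
-- under children, the height strictly drops along edges, and is at most n
def pvGoodG (g : PySem.Dict Int (List Int)) (E : Nat) (n : Int) : Prop :=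
  (∀ r ∈ pvReach (fun i => g.getD i []) E, 1 ≤ r ∧ r ≤ n) ∧
  (∀ r ∈ pvReach (fun i => g.getD i []) E, ∀ j ∈ g.getD r [],
    j ∈ pvReach (fun i => g.getD i []) E ∧ pvRank (fun i => g.getD i []) E j < pvRank (fun i => g.getD i []) E r) ∧
  (∀ r ∈ pvReach (fun i => g.getD i []) E, pvRank (fun i => g.getD i []) E r ≤ n.toNat)

def pvV (g : PySem.Dict Int (List Int)) (present future : List Int) (n i : Int) : Int × Int :=
  pvVal g present future (n.toNat + 1) i

-- st' differs from st exactly on positions k-1 for k ∈ S, where it holds the DP value of k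
def pvAgree (g : PySem.Dict Int (List Int)) (present future : List Int) (n : Int)
    (S : List Int) (st st' : List Int × List Int) : Prop :=
  st'.1.length = st.1.length ∧ st'.2.length = st.2.length ∧
  ∀ k : Int, 1 ≤ k → k ≤ n →
    (PySem.List.pyGetD st'.1 (k-1) 0 =
      (if k ∈ S then (pvV g present future n k).1 else PySem.List.pyGetD st.1 (k-1) 0)) ∧
    (PySem.List.pyGetD st'.2 (k-1) 0 =
      (if k ∈ S then (pvV g present future n k).2 else PySem.List.pyGetD st.2 (k-1) 0))

lemma pvAgree_trans {g : PySem.Dict Int (List Int)} {present future : List Int} {n : Int}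
    {S1 S2 : List Int} {st st' st'' : List Int × List Int}
    (h1 : pvAgree g present future n S1 st st') (h2 : pvAgree g present future n S2 st' st'') :
    pvAgree g present future n (S1 ++ S2) st st'' := by
  obtain ⟨l1, l2, h⟩ := h1
  obtain ⟨l1', l2', h'⟩ := h2
  refine ⟨l1'.trans l1, l2'.trans l2, ?_⟩
  intro k hk1 hk2
  obtain ⟨e1, e2⟩ := h k hk1 hk2
  obtain ⟨e1', e2'⟩ := h' k hk1 hk2
  constructor
  · rw [e1', e1]
    by_cases hs1 : k ∈ S1 <;> by_cases hs2 : k ∈ S2 <;> simp [hs1, hs2]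
  · rw [e2', e2]
    by_cases hs1 : k ∈ S1 <;> by_cases hs2 : k ∈ S2 <;> simp [hs1, hs2]

lemma pvMem_foldl_update {ch : Int → List Int} {x : Int} :
    ∀ (l : List Int) (acc : List Int), x ∈ acc →
      x ∈ l.foldl (fun acc i => PySem.Set.update acc (ch i)) acc := by
  intro l
  induction l with
  | nil => intro acc h; exact h
  | cons c t ih =>
    intro acc h
    exact ih _ ((PySem.Set.mem_update _ _ _).mpr (Or.inl h))

lemma pvReach_one (ch : Int → List Int) : ∀ F : Nat, (1 : Int) ∈ pvReach ch F := by
  intro F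
  induction F with
  | zero => simp [pvReach]
  | succ F ih => exact pvMem_foldl_update _ _ ih

lemma pvBuildGraph_getD_init (n : Int) :
    ∀ i : Int, (((PySem.List.pyRange 1 (n + 1) 1).foldl
      (fun d i => d.insert i ([] : List Int)) PySem.Dict.empty)).getD i [] = [] := by
  suffices h : ∀ (l : List Int) (d : PySem.Dict Int (List Int)), (∀ i : Int, d.getD i [] = []) →
      ∀ i : Int, (l.foldl (fun d i => d.insert i ([] : List Int)) d).getD i [] = [] by
    exact h _ _ (fun i => by simp [PySem.Dict.getD_empty])
  intro l
  induction l with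
  | nil => intro d hd i; exact hd i
  | cons a t ih =>
    intro d hd i
    refine ih _ (fun i => ?_) i
    rw [PySem.Dict.getD_insert]
    split <;> simp [hd]

lemma pvChildren_eq {n : Int} {hierarchy : List (List Int)}
    (hwf : ∀ e ∈ hierarchy, e.length = 2) :
    (fun i => (pvBuildGraph n hierarchy).getD i []) = pvChildren hierarchy := by
  have haux : ∀ (l : List (List Int)) (d : PySem.Dict Int (List Int)),
      (∀ e ∈ l, e.length = 2) → ∀ i : Int,
      (l.foldl (fun d e => match e with
        | [i, j] => d.modify i [] (fun l => l ++ [j])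
        | _ => d) d).getD i [] =
        d.getD i [] ++ ((l.filter (fun e => e.getD 0 0 == i)).map (fun e => e.getD 1 0)) := by
    intro l
    induction l with
    | nil => intro d _ i; simp
    | cons e t ih =>
      intro d hl i
      rcases e with _ | ⟨a, _ | ⟨b, _ | ⟨c, e'⟩⟩⟩
      · exact absurd (hl _ List.mem_cons_self) (by simp)
      · exact absurd (hl _ List.mem_cons_self) (by simp)
      · rw [List.foldl_cons, ih _ (fun e he => hl e (List.mem_cons_of_mem _ he)) i]
        rw [PySem.Dict.getD_modify]
        by_cases hai : i = a
        · subst hai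
          simp
        · simp [show ¬ ((a : Int) == i) = true by simpa using fun h => hai h.symm, hai]
      · exact absurd (hl _ List.mem_cons_self) (by simp)
  funext i
  rw [show pvBuildGraph n hierarchy =
    hierarchy.foldl (fun d e => match e with
      | [i, j] => d.modify i [] (fun l => l ++ [j])
      | _ => d)
      ((PySem.List.pyRange 1 (n + 1) 1).foldl
        (fun d i => d.insert i ([] : List Int)) PySem.Dict.empty) from rfl,
    haux hierarchy _ hwf i, pvBuildGraph_getD_init n i]
  simp [pvChildren]

lemma pvGoodG_of_pre {n : Int} {present future : List Int} {hierarchy : List (List Int)} {budget : Int}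
    (hpre : Pre_maxProfit_incomplete n present future hierarchy budget) :
    pvGoodG (pvBuildGraph n hierarchy) hierarchy.length n := by
  obtain ⟨-, h2, h3, h4, h5⟩ := hpre
  have hce := pvChildren_eq (n := n) (fun e he => (h2 e he).1)
  unfold pvGoodG
  rw [hce]
  refine ⟨fun r hr => ⟨(h3 r hr).1, (h3 r hr).2.1⟩, ?_, h5⟩
  intro r hr j hj
  refine h4 r hr j ?_
  have := congrFun hce r
  simp only at this
  rw [← this]
  exact hj

lemma pvVal_stable {g : PySem.Dict Int (List Int)} {present future : List Int} {E : Nat} {n : Int}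
    (hg : pvGoodG g E n) :
    ∀ (F1 F2 : Nat) (i : Int), i ∈ pvReach (fun i => g.getD i []) E → pvRank (fun i => g.getD i []) E i < F1 → pvRank (fun i => g.getD i []) E i < F2 →
      pvVal g present future F1 i = pvVal g present future F2 i := by
  intro F1
  induction F1 with
  | zero => intro F2 i hr h1 h2; omega
  | succ F1 ih =>
    intro F2 i hr h1 h2
    cases F2 with
    | zero => omega
    | succ F2 =>
      simp only [pvVal]
      have hch : ∀ j ∈ g.getD i [], pvVal g present future F1 j = pvVal g present future F2 j := by
        intro j hj
        obtain ⟨hjR, hjr⟩ := hg.2.1 i hr j hj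
        exact ih F2 j hjR (by omega) (by omega)
      have eA : (g.getD i []).foldl (fun a j => a + (pvVal g present future F1 j).1) (0 : Int) =
          (g.getD i []).foldl (fun a j => a + (pvVal g present future F2 j).1) (0 : Int) :=
        PySem.List.foldl_congr_mem _ _ _ _ (fun acc j hj => by rw [hch j hj])
      have eB : (g.getD i []).foldl (fun a j => a + (pvVal g present future F1 j).2) (0 : Int) =
          (g.getD i []).foldl (fun a j => a + (pvVal g present future F2 j).2) (0 : Int) :=
        PySem.List.foldl_congr_mem _ _ _ _ (fun acc j hj => by rw [hch j hj])
      rw [eA, eB]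

lemma pvPo_stable {g : PySem.Dict Int (List Int)} {E : Nat} {n : Int} (hg : pvGoodG g E n) :
    ∀ (F1 F2 : Nat) (i : Int), i ∈ pvReach (fun i => g.getD i []) E → pvRank (fun i => g.getD i []) E i < F1 → pvRank (fun i => g.getD i []) E i < F2 →
      pvPo g F1 i = pvPo g F2 i := by
  intro F1
  induction F1 with
  | zero => intro F2 i hr h1 h2; omega
  | succ F1 ih =>
    intro F2 i hr h1 h2
    cases F2 with
    | zero => omega
    | succ F2 =>
      simp only [pvPo]
      congr 1
      refine List.flatMap_congr (fun j hj => ?_)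
      obtain ⟨hjR, hjr⟩ := hg.2.1 i hr j hj
      exact ih F2 j hjR (by omega) (by omega)

lemma pvCostB_stable {g : PySem.Dict Int (List Int)} {E : Nat} {n : Int} (hg : pvGoodG g E n) :
    ∀ (F1 F2 : Nat) (i : Int), i ∈ pvReach (fun i => g.getD i []) E → pvRank (fun i => g.getD i []) E i < F1 → pvRank (fun i => g.getD i []) E i < F2 →
      pvCostB g F1 i = pvCostB g F2 i := by
  intro F1
  induction F1 with
  | zero => intro F2 i hr h1 h2; omega
  | succ F1 ih =>
    intro F2 i hr h1 h2
    cases F2 with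
    | zero => omega
    | succ F2 =>
      simp only [pvCostB]
      refine PySem.List.foldl_congr_mem _ _ _ _ (fun acc j hj => ?_)
      obtain ⟨hjR, hjr⟩ := hg.2.1 i hr j hj
      rw [ih F2 j hjR (by omega) (by omega)]

lemma pvChild_bound {g : PySem.Dict Int (List Int)} {E : Nat} {n : Int} (hg : pvGoodG g E n)
    {i j : Int} (hr : i ∈ pvReach (fun i => g.getD i []) E) (hj : j ∈ g.getD i []) :
    j ∈ pvReach (fun i => g.getD i []) E ∧ 1 ≤ j ∧ j ≤ n ∧ pvRank (fun i => g.getD i []) E j < pvRank (fun i => g.getD i []) E i := by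
  obtain ⟨hjR, hjr⟩ := hg.2.1 i hr j hj
  exact ⟨hjR, (hg.1 j hjR).1, (hg.1 j hjR).2, hjr⟩

lemma pvPo_unfold {g : PySem.Dict Int (List Int)} {E : Nat} {n : Int} (hg : pvGoodG g E n)
    {i : Int} (hr : i ∈ pvReach (fun i => g.getD i []) E) :
    pvPo g (n.toNat + 1) i = ((g.getD i []).flatMap (pvPo g (n.toNat + 1))) ++ [i] := by
  rw [show pvPo g (n.toNat + 1) i = ((g.getD i []).flatMap (pvPo g n.toNat)) ++ [i] from rfl]
  congr 1
  refine List.flatMap_congr (fun j hj => ?_)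
  obtain ⟨hjR, _, _, hjr⟩ := pvChild_bound hg hr hj
  have hri := hg.2.2 i hr
  exact pvPo_stable hg _ _ j hjR (by omega) (by omega)

lemma pvPo_self_mem (g : PySem.Dict Int (List Int)) (F : Nat) (i : Int) :
    i ∈ pvPo g (F + 1) i := by
  simp [pvPo]

-- the step function of A's inner for-loop (proof-only name for the lambda in pvDfsA)
def pvStepA (g : PySem.Dict Int (List Int)) (present future : List Int) (F : Nat)
    (acc : (List Int × List Int) × Int × Int) (j : Int) : (List Int × List Int) × Int × Int :=
  let st' := pvDfsA g present future F j acc.1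
  (st', acc.2.1 + PySem.List.pyGetD st'.2 (j-1) 0, acc.2.2 + PySem.List.pyGetD st'.1 (j-1) 0)

lemma pvDfsA_succ (g : PySem.Dict Int (List Int)) (present future : List Int) (F : Nat)
    (i : Int) (st : List Int × List Int) :
    pvDfsA g present future (F+1) i st =
      (PySem.List.pySetD ((g.getD i []).foldl (pvStepA g present future F) (st, 0, 0)).1.1 (i-1)
        (max ((g.getD i []).foldl (pvStepA g present future F) (st, 0, 0)).2.2
          (PySem.List.pyGetD future (i-1) 0 - PySem.List.pyGetD present (i-1) 0 +
            ((g.getD i []).foldl (pvStepA g present future F) (st, 0, 0)).2.1)),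
       PySem.List.pySetD ((g.getD i []).foldl (pvStepA g present future F) (st, 0, 0)).1.2 (i-1)
        (max ((g.getD i []).foldl (pvStepA g present future F) (st, 0, 0)).2.2
          (PySem.List.pyGetD future (i-1) 0 -
            PySem.Int.floordiv (PySem.List.pyGetD present (i-1) 0) 2 +
            ((g.getD i []).foldl (pvStepA g present future F) (st, 0, 0)).2.1))) := rfl

lemma pvVal_succ (g : PySem.Dict Int (List Int)) (present future : List Int) (F : Nat) (i : Int) :
    pvVal g present future (F+1) i =
      (max ((g.getD i []).foldl (fun a j => a + (pvVal g present future F j).1) (0 : Int))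
        (PySem.List.pyGetD future (i-1) 0 - PySem.List.pyGetD present (i-1) 0 +
          (g.getD i []).foldl (fun a j => a + (pvVal g present future F j).2) (0 : Int)),
       max ((g.getD i []).foldl (fun a j => a + (pvVal g present future F j).1) (0 : Int))
        (PySem.List.pyGetD future (i-1) 0 -
          PySem.Int.floordiv (PySem.List.pyGetD present (i-1) 0) 2 +
          (g.getD i []).foldl (fun a j => a + (pvVal g present future F j).2) (0 : Int))) := rfl

-- the canonical DP value, written with the child sums of pvV itself
lemma pvV_eq {g : PySem.Dict Int (List Int)} {present future : List Int} {E : Nat} {n : Int}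
    (hg : pvGoodG g E n) {i : Int} (hr : i ∈ pvReach (fun i => g.getD i []) E) :
    pvV g present future n i =
      (max ((g.getD i []).foldl (fun a j => a + (pvV g present future n j).1) (0 : Int))
        (PySem.List.pyGetD future (i-1) 0 - PySem.List.pyGetD present (i-1) 0 +
          (g.getD i []).foldl (fun a j => a + (pvV g present future n j).2) (0 : Int)),
       max ((g.getD i []).foldl (fun a j => a + (pvV g present future n j).1) (0 : Int))
        (PySem.List.pyGetD future (i-1) 0 -
          PySem.Int.floordiv (PySem.List.pyGetD present (i-1) 0) 2 +
          (g.getD i []).foldl (fun a j => a + (pvV g present future n j).2) (0 : Int))) := by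
  have hri := hg.2.2 i hr
  have hch : ∀ j ∈ g.getD i [], pvVal g present future n.toNat j = pvV g present future n j := by
    intro j hj
    obtain ⟨hjR, _, _, hjr⟩ := pvChild_bound hg hr hj
    exact pvVal_stable hg _ _ j hjR (by omega) (by omega)
  have eA : (g.getD i []).foldl (fun a j => a + (pvVal g present future n.toNat j).1) (0 : Int) =
      (g.getD i []).foldl (fun a j => a + (pvV g present future n j).1) (0 : Int) :=
    PySem.List.foldl_congr_mem _ _ _ _ (fun acc j hj => by rw [hch j hj])
  have eB : (g.getD i []).foldl (fun a j => a + (pvVal g present future n.toNat j).2) (0 : Int) =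
      (g.getD i []).foldl (fun a j => a + (pvV g present future n j).2) (0 : Int) :=
    PySem.List.foldl_congr_mem _ _ _ _ (fun acc j hj => by rw [hch j hj])
  rw [show pvV g present future n i = pvVal g present future (n.toNat + 1) i from rfl,
      pvVal_succ, eA, eB]

-- writing the DP pair of i on top of a state that already carries its children's subtrees
lemma pvWrite_agree {g : PySem.Dict Int (List Int)} {present future : List Int} {E : Nat} {n : Int}
    (hg : pvGoodG g E n) {i : Int} (hr : i ∈ pvReach (fun i => g.getD i []) E) (h1 : 1 ≤ i) (h2 : i ≤ n)
    {st st1 : List Int × List Int} (hl1 : st.1.length = n.toNat) (hl2 : st.2.length = n.toNat)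
    (hagree : pvAgree g present future n ((g.getD i []).flatMap (pvPo g (n.toNat + 1))) st st1)
    {v1 v2 : Int} (hv : pvV g present future n i = (v1, v2)) :
    pvAgree g present future n (pvPo g (n.toNat + 1) i) st
      (PySem.List.pySetD st1.1 (i-1) v1, PySem.List.pySetD st1.2 (i-1) v2) := by
  obtain ⟨L1, L2, H⟩ := hagree
  refine ⟨by simpa [PySem.List.length_pySetD] using L1,
          by simpa [PySem.List.length_pySetD] using L2, ?_⟩
  intro k hk1 hk2
  have hmem : k ∈ pvPo g (n.toNat + 1) i ↔
      (k ∈ (g.getD i []).flatMap (pvPo g (n.toNat + 1)) ∨ k = i) := by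
    rw [pvPo_unfold hg hr]; simp
  have hkl1 : (k-1).toNat < st1.1.length := by omega
  have hkl2 : (k-1).toNat < st1.2.length := by omega
  rw [PySem.List.pySetD_of_nonneg _ _ (by omega : (0:Int) ≤ i-1),
      PySem.List.pySetD_of_nonneg _ _ (by omega : (0:Int) ≤ i-1)]
  have g1 : PySem.List.pyGetD (st1.1.set (i-1).toNat v1) (k-1) 0 =
      if i = k then v1 else PySem.List.pyGetD st1.1 (k-1) 0 := by
    rw [PySem.List.pyGetD_eq_getElem _ _ (by omega) (by simp only [List.length_set]; omega),
        List.getElem_set]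
    split
    · rename_i h; simp [show i = k by omega]
    · rename_i h
      rw [PySem.List.pyGetD_eq_getElem _ _ (by omega) (by omega)]
      simp [show ¬ i = k by omega]
  have g2 : PySem.List.pyGetD (st1.2.set (i-1).toNat v2) (k-1) 0 =
      if i = k then v2 else PySem.List.pyGetD st1.2 (k-1) 0 := by
    rw [PySem.List.pyGetD_eq_getElem _ _ (by omega) (by simp only [List.length_set]; omega),
        List.getElem_set]
    split
    · rename_i h; simp [show i = k by omega]
    · rename_i h
      rw [PySem.List.pyGetD_eq_getElem _ _ (by omega) (by omega)]
      simp [show ¬ i = k by omega]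
  by_cases hik : i = k
  · subst hik
    have hmem' : i ∈ pvPo g (n.toNat + 1) i := hmem.mpr (Or.inr rfl)
    rw [g1, g2]
    constructor <;> simp [hmem', hv]
  · obtain ⟨e1, e2⟩ := H k hk1 hk2
    rw [g1, g2, if_neg hik, if_neg hik, e1, e2]
    by_cases hkS : k ∈ (g.getD i []).flatMap (pvPo g (n.toNat + 1))
    · simp [hkS, hmem.mpr (Or.inl hkS)]
    · have : ¬ k ∈ pvPo g (n.toNat + 1) i := by
        rw [hmem]
        rintro (h | h)
        · exact hkS h
        · exact hik h.symm
      simp [hkS, this]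

-- A's inner for-loop over a child list, with the bestBuy/bestPass accumulators
lemma pvFoldA_aux {g : PySem.Dict Int (List Int)} {present future : List Int} {E : Nat} {n : Int}
    (hg : pvGoodG g E n) (F : Nat)
    (hrec : ∀ (j : Int) (st : List Int × List Int),
      j ∈ pvReach (fun i => g.getD i []) E → st.1.length = n.toNat → st.2.length = n.toNat → pvRank (fun i => g.getD i []) E j < F →
      pvAgree g present future n (pvPo g (n.toNat + 1) j) st (pvDfsA g present future F j st)) :
    ∀ (cs : List Int) (st : List Int × List Int) (bb bp : Int),
      (∀ j ∈ cs, j ∈ pvReach (fun i => g.getD i []) E ∧ pvRank (fun i => g.getD i []) E j < F) →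
      st.1.length = n.toNat → st.2.length = n.toNat →
      pvAgree g present future n (cs.flatMap (pvPo g (n.toNat + 1))) st
        (cs.foldl (pvStepA g present future F) (st, bb, bp)).1 ∧
      (cs.foldl (pvStepA g present future F) (st, bb, bp)).2.1 =
        bb + (cs.map (fun j => (pvV g present future n j).2)).sum ∧
      (cs.foldl (pvStepA g present future F) (st, bb, bp)).2.2 =
        bp + (cs.map (fun j => (pvV g present future n j).1)).sum := by
  intro cs
  induction cs with
  | nil =>
    intro st bb bp hcs hl1 hl2
    refine ⟨⟨rfl, rfl, fun k hk1 hk2 => by simp⟩, by simp, by simp⟩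
  | cons c t ih =>
    intro st bb bp hcs hl1 hl2
    obtain ⟨hcR, hcF⟩ := hcs c List.mem_cons_self
    have hc1 : 1 ≤ c := (hg.1 c hcR).1
    have hc2 : c ≤ n := (hg.1 c hcR).2
    have h1 := hrec c st hcR hl1 hl2 hcF
    have hst1l1 : (pvDfsA g present future F c st).1.length = n.toNat := by rw [h1.1, hl1]
    have hst1l2 : (pvDfsA g present future F c st).2.length = n.toNat := by rw [h1.2.1, hl2]
    have hcm : c ∈ pvPo g (n.toNat + 1) c := pvPo_self_mem g n.toNat c
    obtain ⟨e1, e2⟩ := h1.2.2 c hc1 hc2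
    have hr1 : PySem.List.pyGetD (pvDfsA g present future F c st).1 (c-1) 0 =
        (pvV g present future n c).1 := by rw [e1, if_pos hcm]
    have hr2 : PySem.List.pyGetD (pvDfsA g present future F c st).2 (c-1) 0 =
        (pvV g present future n c).2 := by rw [e2, if_pos hcm]
    have hstep : pvStepA g present future F (st, bb, bp) c =
        (pvDfsA g present future F c st, bb + (pvV g present future n c).2,
          bp + (pvV g present future n c).1) := by
      simp only [pvStepA]; rw [hr1, hr2]
    rw [List.foldl_cons, hstep]
    obtain ⟨ha, hs1, hs2⟩ := ih (pvDfsA g present future F c st)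
      (bb + (pvV g present future n c).2) (bp + (pvV g present future n c).1)
      (fun j hj => hcs j (List.mem_cons_of_mem _ hj)) hst1l1 hst1l2
    refine ⟨?_, by rw [hs1, List.map_cons, List.sum_cons]; try ring,
      by rw [hs2, List.map_cons, List.sum_cons]; try ring⟩
    have := pvAgree_trans h1 ha
    simpa [List.flatMap_cons] using this

-- main lemma, A side
lemma pvDfsA_spec {g : PySem.Dict Int (List Int)} {present future : List Int} {E : Nat} {n : Int}
    (hg : pvGoodG g E n) :
    ∀ (F : Nat) (i : Int) (st : List Int × List Int),
      i ∈ pvReach (fun i => g.getD i []) E → st.1.length = n.toNat → st.2.length = n.toNat → pvRank (fun i => g.getD i []) E i < F →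
      pvAgree g present future n (pvPo g (n.toNat + 1) i) st (pvDfsA g present future F i st) := by
  intro F
  induction F with
  | zero => intro i st hr hl1 hl2 hF; omega
  | succ F ih =>
    intro i st hr hl1 hl2 hF
    have h1 : 1 ≤ i := (hg.1 i hr).1
    have h2 : i ≤ n := (hg.1 i hr).2
    have hcs : ∀ j ∈ g.getD i [], j ∈ pvReach (fun i => g.getD i []) E ∧ pvRank (fun i => g.getD i []) E j < F := by
      intro j hj
      obtain ⟨hjR, _, _, hjr⟩ := pvChild_bound hg hr hj
      exact ⟨hjR, by omega⟩
    obtain ⟨ha, hs1, hs2⟩ := pvFoldA_aux hg F ih (g.getD i []) st 0 0 hcs hl1 hl2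
    rw [pvDfsA_succ]
    refine pvWrite_agree hg hr h1 h2 hl1 hl2 ha ?_
    rw [pvV_eq hg hr]
    have eA : (g.getD i []).foldl (fun a j => a + (pvV g present future n j).1) (0 : Int) =
        ((g.getD i []).foldl (pvStepA g present future F) (st, 0, 0)).2.2 := by
      rw [hs2, PySem.List.foldl_add]; try simp
    have eB : (g.getD i []).foldl (fun a j => a + (pvV g present future n j).2) (0 : Int) =
        ((g.getD i []).foldl (pvStepA g present future F) (st, 0, 0)).2.1 := by
      rw [hs1, PySem.List.foldl_add]; try simp
    rw [eA, eB]

-- B's final pass over the post-orders of a list of children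
lemma pvFoldB_aux {g : PySem.Dict Int (List Int)} {present future : List Int} {E : Nat} {n : Int}
    (_hg : pvGoodG g E n) (F : Nat)
    (hrec : ∀ (j : Int) (st : List Int × List Int),
      j ∈ pvReach (fun i => g.getD i []) E → st.1.length = n.toNat → st.2.length = n.toNat → pvRank (fun i => g.getD i []) E j < F →
      pvAgree g present future n (pvPo g (n.toNat + 1) j) st
        ((pvPo g F j).foldl (pvStepB g present future) st)) :
    ∀ (cs : List Int) (st : List Int × List Int),
      (∀ j ∈ cs, j ∈ pvReach (fun i => g.getD i []) E ∧ pvRank (fun i => g.getD i []) E j < F) →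
      st.1.length = n.toNat → st.2.length = n.toNat →
      pvAgree g present future n (cs.flatMap (pvPo g (n.toNat + 1))) st
        ((cs.flatMap (pvPo g F)).foldl (pvStepB g present future) st) := by
  intro cs
  induction cs with
  | nil =>
    intro st hcs hl1 hl2
    exact ⟨rfl, rfl, fun k hk1 hk2 => by simp⟩
  | cons c t ih =>
    intro st hcs hl1 hl2
    obtain ⟨hcR, hcF⟩ := hcs c List.mem_cons_self
    have h1 := hrec c st hcR hl1 hl2 hcF
    have hst1l1 : ((pvPo g F c).foldl (pvStepB g present future) st).1.length = n.toNat := by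
      rw [h1.1, hl1]
    have hst1l2 : ((pvPo g F c).foldl (pvStepB g present future) st).2.length = n.toNat := by
      rw [h1.2.1, hl2]
    have ha := ih ((pvPo g F c).foldl (pvStepB g present future) st)
      (fun j hj => hcs j (List.mem_cons_of_mem _ hj)) hst1l1 hst1l2
    have := pvAgree_trans h1 ha
    simpa [List.flatMap_cons, List.foldl_append] using this

-- main lemma, B side: folding pvStepB over the post-order of i has the same effect
lemma pvFoldB_spec {g : PySem.Dict Int (List Int)} {present future : List Int} {E : Nat} {n : Int}
    (hg : pvGoodG g E n) :
    ∀ (F : Nat) (i : Int) (st : List Int × List Int),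
      i ∈ pvReach (fun i => g.getD i []) E → st.1.length = n.toNat → st.2.length = n.toNat → pvRank (fun i => g.getD i []) E i < F →
      pvAgree g present future n (pvPo g (n.toNat + 1) i) st
        ((pvPo g F i).foldl (pvStepB g present future) st) := by
  intro F
  induction F with
  | zero => intro i st hr hl1 hl2 hF; omega
  | succ F ih =>
    intro i st hr hl1 hl2 hF
    have h1 : 1 ≤ i := (hg.1 i hr).1
    have h2 : i ≤ n := (hg.1 i hr).2
    have hcs : ∀ j ∈ g.getD i [], j ∈ pvReach (fun i => g.getD i []) E ∧ pvRank (fun i => g.getD i []) E j < F := by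
      intro j hj
      obtain ⟨hjR, _, _, hjr⟩ := pvChild_bound hg hr hj
      exact ⟨hjR, by omega⟩
    have ha := pvFoldB_aux hg F ih (g.getD i []) st hcs hl1 hl2
    have hst1l1 : (((g.getD i []).flatMap (pvPo g F)).foldl (pvStepB g present future) st).1.length
        = n.toNat := by rw [ha.1, hl1]
    have hst1l2 : (((g.getD i []).flatMap (pvPo g F)).foldl (pvStepB g present future) st).2.length
        = n.toNat := by rw [ha.2.1, hl2]
    rw [show pvPo g (F+1) i = ((g.getD i []).flatMap (pvPo g F)) ++ [i] from rfl,
        List.foldl_append]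
    set st1 := ((g.getD i []).flatMap (pvPo g F)).foldl (pvStepB g present future) st with hst1
    have hread : ∀ j ∈ g.getD i [],
        (PySem.List.pyGetD st1.1 (j-1) 0 = (pvV g present future n j).1 ∧
         PySem.List.pyGetD st1.2 (j-1) 0 = (pvV g present future n j).2) := by
      intro j hj
      obtain ⟨hjR, hj1, hj2, _⟩ := pvChild_bound hg hr hj
      have hjm : j ∈ (g.getD i []).flatMap (pvPo g (n.toNat + 1)) :=
        List.mem_flatMap.mpr ⟨j, hj, pvPo_self_mem g n.toNat j⟩
      obtain ⟨e1, e2⟩ := ha.2.2 j hj1 hj2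
      exact ⟨by rw [e1, if_pos hjm], by rw [e2, if_pos hjm]⟩
    have hbb : (g.getD i []).foldl (fun a j => a + PySem.List.pyGetD st1.2 (j-1) 0) (0 : Int) =
        (g.getD i []).foldl (fun a j => a + (pvV g present future n j).2) (0 : Int) :=
      PySem.List.foldl_congr_mem _ _ _ _ (fun acc j hj => by rw [(hread j hj).2])
    have hbp : (g.getD i []).foldl (fun a j => a + PySem.List.pyGetD st1.1 (j-1) 0) (0 : Int) =
        (g.getD i []).foldl (fun a j => a + (pvV g present future n j).1) (0 : Int) :=
      PySem.List.foldl_congr_mem _ _ _ _ (fun acc j hj => by rw [(hread j hj).1])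
    rw [show ([i].foldl (pvStepB g present future) st1) = pvStepB g present future st1 i from rfl]
    rw [show pvStepB g present future st1 i =
      (PySem.List.pySetD st1.1 (i-1)
        (max ((g.getD i []).foldl (fun a j => a + PySem.List.pyGetD st1.1 (j-1) 0) (0 : Int))
          (PySem.List.pyGetD future (i-1) 0 - PySem.List.pyGetD present (i-1) 0 +
            (g.getD i []).foldl (fun a j => a + PySem.List.pyGetD st1.2 (j-1) 0) (0 : Int))),
       PySem.List.pySetD st1.2 (i-1)
        (max ((g.getD i []).foldl (fun a j => a + PySem.List.pyGetD st1.1 (j-1) 0) (0 : Int))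
          (PySem.List.pyGetD future (i-1) 0 -
            PySem.Int.floordiv (PySem.List.pyGetD present (i-1) 0) 2 +
            (g.getD i []).foldl (fun a j => a + PySem.List.pyGetD st1.2 (j-1) 0) (0 : Int)))) from rfl]
    rw [hbb, hbp]
    exact pvWrite_agree hg hr h1 h2 hl1 hl2 ha (pvV_eq hg hr)

def pvItemPo (g : PySem.Dict Int (List Int)) (n : Int) (x : Int × Bool) : List Int :=
  if x.2 then [x.1] else pvPo g (n.toNat + 1) x.1

def pvItemCost (g : PySem.Dict Int (List Int)) (n : Int) (x : Int × Bool) : Nat :=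
  if x.2 then 1 else pvCostB g (n.toNat + 1) x.1

lemma pvFoldl_add_nat (h : Int → Nat) :
    ∀ (l : List Int) (a : Nat), l.foldl (fun x y => x + h y) a = a + (l.map h).sum := by
  intro l
  induction l with
  | nil => simp
  | cons c t ih => intro a; simp [ih, Nat.add_assoc]

lemma pvCostB_pos (g : PySem.Dict Int (List Int)) : ∀ (F : Nat) (i : Int), 1 ≤ pvCostB g F i := by
  intro F i
  cases F with
  | zero => simp [pvCostB]
  | succ F => simp only [pvCostB, pvFoldl_add_nat]; omega

lemma pvRevPush : ∀ (l : List Int) (init : List (Int × Bool)),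
    l.reverse.foldl (fun s j => (j, false) :: s) init = l.map (fun j => (j, false)) ++ init := by
  intro l
  induction l with
  | nil => simp
  | cons c t ih =>
    intro init
    simp only [List.reverse_cons, List.foldl_append, List.foldl_cons, List.foldl_nil, ih,
      List.map_cons, List.cons_append]

lemma pvStackB_spec {g : PySem.Dict Int (List Int)} {E : Nat} {n : Int} (hg : pvGoodG g E n) :
    ∀ (F : Nat) (stack : List (Int × Bool)) (order : List Int),
      (∀ x ∈ stack, x.2 = false → x.1 ∈ pvReach (fun i => g.getD i []) E) →
      (stack.map (pvItemCost g n)).sum ≤ F →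
      pvStackB g F stack order = order ++ stack.flatMap (pvItemPo g n) := by
  intro F
  induction F with
  | zero =>
    intro stack order hval hsum
    cases stack with
    | nil => simp [pvStackB]
    | cons x rest =>
      exfalso
      have h1 : 1 ≤ pvItemCost g n x := by
        unfold pvItemCost; split
        · exact le_refl 1
        · exact pvCostB_pos g _ _
      simp only [List.map_cons, List.sum_cons] at hsum
      omega
  | succ F ih =>
    intro stack order hval hsum
    cases stack with
    | nil => simp [pvStackB]
    | cons x rest =>
      obtain ⟨node, done⟩ := x
      cases done with
      | true =>
        rw [show pvStackB g (F+1) ((node, true) :: rest) order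
            = pvStackB g F rest (order ++ [node]) from rfl]
        rw [ih rest (order ++ [node]) (fun x hx hf => hval x (List.mem_cons_of_mem _ hx) hf)
          (by simp only [List.map_cons, List.sum_cons, pvItemCost, if_pos] at hsum ⊢; omega)]
        simp [pvItemPo, List.flatMap_cons, List.append_assoc]
      | false =>
        have hnR := hval (node, false) List.mem_cons_self rfl
        have hrn := hg.2.2 node hnR
        have hch : ∀ j ∈ g.getD node [],
            j ∈ pvReach (fun i => g.getD i []) E ∧ pvRank (fun i => g.getD i []) E j < n.toNat := by
          intro j hj
          obtain ⟨hjR, hjr⟩ := hg.2.1 node hnR j hj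
          exact ⟨hjR, by omega⟩
        rw [show pvStackB g (F+1) ((node, false) :: rest) order
            = pvStackB g F
                ((g.getD node []).reverse.foldl (fun s j => (j, false) :: s)
                  ((node, true) :: rest)) order from rfl]
        rw [pvRevPush]
        have hcost : pvCostB g (n.toNat + 1) node =
            ((g.getD node []).map (fun j => pvCostB g (n.toNat + 1) j)).sum + 2 := by
          rw [show pvCostB g (n.toNat + 1) node =
            (g.getD node []).foldl (fun a j => a + pvCostB g n.toNat j) 2 from rfl,
            pvFoldl_add_nat]
          have : (g.getD node []).map (fun j => pvCostB g n.toNat j) =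
              (g.getD node []).map (fun j => pvCostB g (n.toNat + 1) j) :=
            List.map_congr_left (fun j hj => by
              obtain ⟨hjR, hjr⟩ := hch j hj
              exact pvCostB_stable hg _ _ j hjR hjr (by omega))
          rw [this]; omega
        have hval' : ∀ x ∈ (g.getD node []).map (fun j => (j, false)) ++ (node, true) :: rest,
            x.2 = false → x.1 ∈ pvReach (fun i => g.getD i []) E := by
          intro x hx hf
          rcases List.mem_append.mp hx with hx | hx
          · obtain ⟨j, hj, rfl⟩ := List.mem_map.mp hx
            exact (hch j hj).1
          · rcases List.mem_cons.mp hx with rfl | hx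
            · cases hf
            · exact hval x (List.mem_cons_of_mem _ hx) hf
        have hsum0 : pvCostB g (n.toNat + 1) node + (rest.map (pvItemCost g n)).sum ≤ F + 1 := by
          simpa [pvItemCost] using hsum
        have hsum' : (((g.getD node []).map (fun j => (j, false)) ++ (node, true) :: rest).map
            (pvItemCost g n)).sum ≤ F := by
          have e2 : (((g.getD node []).map (fun j => (j, false))).map (pvItemCost g n)).sum =
              ((g.getD node []).map (fun j => pvCostB g (n.toNat + 1) j)).sum := by
            rw [List.map_map]
            exact congrArg List.sum (List.map_congr_left (fun j _ => by simp [pvItemCost]))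
          simp only [List.map_append, List.sum_append, List.map_cons, List.sum_cons, e2]
          have e3 : pvItemCost g n (node, true) = 1 := by simp [pvItemCost]
          rw [e3]
          omega
        rw [ih _ order hval' hsum']
        congr 1
        have e1 : ((g.getD node []).map (fun j => (j, false))).flatMap (pvItemPo g n) =
            (g.getD node []).flatMap (pvPo g (n.toNat + 1)) := by
          rw [List.flatMap_map]
          exact List.flatMap_congr (fun j _ => by simp [pvItemPo])
        have e2 : pvItemPo g n (node, false) = pvPo g (n.toNat + 1) node := by simp [pvItemPo]
        have e3 : pvItemPo g n (node, true) = [node] := by simp [pvItemPo]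
        simp only [List.flatMap_append, List.flatMap_cons, e1, e2, e3]
        rw [pvPo_unfold hg hnR]
        simp [List.append_assoc]

lemma pvAgree_out_eq {g : PySem.Dict Int (List Int)} {present future : List Int} {n : Int}
    {S : List Int} {st stA stB : List Int × List Int}
    (hA : pvAgree g present future n S st stA) (hB : pvAgree g present future n S st stB)
    (hl : st.1.length = n.toNat) : stA.1 = stB.1 := by
  obtain ⟨lA, _, hA'⟩ := hA
  obtain ⟨lB, _, hB'⟩ := hB
  apply List.ext_getElem (by rw [lA, lB])
  intro m hm1 hm2
  have hmn : m < n.toNat := by rw [← hl, ← lA]; exact hm1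
  have hk1 : (1 : Int) ≤ (m : Int) + 1 := by omega
  have hk2 : ((m : Int) + 1) ≤ n := by omega
  have eA := (hA' ((m : Int) + 1) hk1 hk2).1
  have eB := (hB' ((m : Int) + 1) hk1 hk2).1
  have hidx : ((m : Int) + 1 - 1) = ((m : Nat) : Int) := by omega
  rw [hidx, PySem.List.pyGetD_natCast] at eA eB
  rw [List.getD_eq_getElem _ _ (show m < stA.1.length by rw [lA, hl]; exact hmn)] at eA
  rw [List.getD_eq_getElem _ _ (show m < stB.1.length by rw [lB, hl]; exact hmn)] at eB
  exact eA.trans eB.symm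

-- ===== VERDICT (by name: the statement is the Claim_ definition above) =====
theorem maxProfit_incomplete_spec : Claim_equal_maxProfit_incomplete := by
  unfold Claim_equal_maxProfit_incomplete
  intro n present future hierarchy budget hdom hpre
  unfold Spec_maxProfit_incomplete
  have hg := pvGoodG_of_pre hpre
  obtain ⟨hn1, -, -, -, -⟩ := hpre
  simp only [maxProfit_incomplete, maxProfit_incomplete_alt]
  set g := pvBuildGraph n hierarchy with hgdef
  set mp0 : List Int := List.replicate n.toNat 0 with hmp0
  have hl : mp0.length = n.toNat := by simp [hmp0]
  have h1R : (1 : Int) ∈ pvReach (fun i => g.getD i []) hierarchy.length := pvReach_one _ _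
  have hrk : pvRank (fun i => g.getD i []) hierarchy.length 1 < n.toNat + 1 := by
    have := hg.2.2 1 h1R; omega
  have hA := pvDfsA_spec (present := present) (future := future) hg (n.toNat + 1) 1 (mp0, mp0)
    h1R hl hl hrk
  have horder : pvStackB g (pvCostB g (n.toNat + 1) 1) [(1, false)] [] =
      pvPo g (n.toNat + 1) 1 := by
    rw [pvStackB_spec hg _ [(1, false)] []
      (fun x hx hf => by simp only [List.mem_singleton] at hx; subst hx; exact h1R)
      (by simp [pvItemCost])]
    simp [pvItemPo]
  rw [horder]
  have hB := pvFoldB_spec (present := present) (future := future) hg (n.toNat + 1) 1 (mp0, mp0)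
    h1R hl hl hrk
  exact pvAgree_out_eq hA hB hl
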